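-- pv_equiv track=rewrite | github.com/DataZwer/MyModel2 | data_helper/data_utils.py | get_widx
-- ===== SOURCE A (Python) =====
-- def get_widx(sens):
--
--     word_index = {}
--     word_index['#OOV#'] = 0
--     id = 1
--     for sen in sens:
--         for word in sen:
--             if word.lower() not in word_index:
--                 word_index[word.lower()] = id
--                 id = id + 1
--
--     return word_index
-- ===== SOURCE B (Python) =====
-- def get_widx(sens):
--     flat = [w.lower() for sen in sens for w in sen]
--     first = {}
--     for pos, word in reversed(list(enumerate(flat))):
--         first[word] = pos
--     order = sorted(first, key=first.get)
--     result = {'#OOV#': 0}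
--     for i, word in enumerate(order):
--         result[word] = i + 1
--     return result
-- ===== Notes on version B (the rewrite author's own statement) =====
-- stated objective: alternative
-- what changed: A's single pass with an inline membership test and counter is replaced by computing each word's first-occurrence position with one reverse overwrite pass over the flattened lowercased stream, then sorting the vocabulary by that position and numbering it behind '#OOV#': 0.
import Mathlib
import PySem

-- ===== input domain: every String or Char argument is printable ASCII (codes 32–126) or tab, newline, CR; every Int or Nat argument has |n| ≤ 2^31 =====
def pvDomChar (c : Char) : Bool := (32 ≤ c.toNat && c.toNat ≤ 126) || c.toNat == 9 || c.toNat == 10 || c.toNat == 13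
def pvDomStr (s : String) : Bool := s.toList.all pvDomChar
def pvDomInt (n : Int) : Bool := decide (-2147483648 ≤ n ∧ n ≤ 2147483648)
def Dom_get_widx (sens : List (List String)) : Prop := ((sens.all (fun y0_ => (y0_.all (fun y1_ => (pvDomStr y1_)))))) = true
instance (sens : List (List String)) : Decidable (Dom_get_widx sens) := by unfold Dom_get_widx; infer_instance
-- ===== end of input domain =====

-- B computes first-occurrence positions by a reverse overwrite pass, then sorts the vocabulary
-- by that position and numbers it behind '#OOV#': 0, instead of A's single pass with an inline counter.

-- ===== PORT A =====
def get_widx (sens : List (List String)) : List (String × Int) :=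
  let word_index : PySem.Dict String Int := PySem.Dict.empty
  let word_index := word_index.insert "#OOV#" 0
  let st := sens.foldl (fun st sen =>
      sen.foldl (fun (st : PySem.Dict String Int × Int) word =>
          if st.1.contains (PySem.Str.lower word) = false then
            (st.1.insert (PySem.Str.lower word) st.2, st.2 + 1)
          else st) st)
    (word_index, 1)
  st.1.items

-- ===== PORT B =====
def get_widx_alt (sens : List (List String)) : List (String × Int) :=
  let flat := sens.flatMap (fun sen => sen.map PySem.Str.lower)
  let first := ((PySem.List.enumerate flat 0).reverse).foldl
      (fun (d : PySem.Dict String Int) p => d.insert p.2 p.1) PySem.Dict.empty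
  -- Python's key=first.get: every sorted element is a key of `first`, so getD is exact there
  let order := PySem.List.sorted first.keys (fun w => first.getD w 0) false
  let result := (PySem.Dict.empty : PySem.Dict String Int).insert "#OOV#" 0
  ((PySem.List.enumerate order 0).foldl
      (fun (d : PySem.Dict String Int) p => d.insert p.2 (p.1 + 1)) result).items

-- ===== PRECONDITION & SPEC =====
def Spec_get_widx (sens : List (List String)) (out : List (String × Int)) : Prop := out = get_widx_alt sens
instance (sens : List (List String)) (out : List (String × Int)) : Decidable (Spec_get_widx sens out) := by unfold Spec_get_widx; infer_instance

-- ===== CLAIM (what is proved, stated in full; the proofs are below) =====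
def Claim_equal_get_widx : Prop := ∀ (sens : List (List String)), Dom_get_widx sens → Spec_get_widx sens (get_widx sens)

-- ===== LEMMAS AND PROOFS =====

-- A's loop body, on an already-lowercased word
def stepA (st : PySem.Dict String Int × Int) (w : String) : PySem.Dict String Int × Int :=
  if st.1.contains w = false then (st.1.insert w st.2, st.2 + 1) else st

-- the numbered vocabulary ("word", id) with ids 1, 2, …
def numb (ks : List String) : List (String × Int) :=
  (PySem.List.enumerate ks 1).map (fun p => (p.2, p.1))

lemma lowerChar_ne_O (c : Char) : PySem.Chars.lowerChar c ≠ 'O' := by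
  intro h
  by_cases hu : PySem.Chars.isupper c = true
  · simp only [PySem.Chars.lowerChar, hu, if_true] at h
    have hb : 65 ≤ c.toNat ∧ c.toNat ≤ 90 := by
      simp only [PySem.Chars.isupper, Bool.and_eq_true, decide_eq_true_eq] at hu
      obtain ⟨h1, h2⟩ := hu
      rw [Char.le_def] at h1 h2
      constructor <;> [exact h1; exact h2]
    have hv : (c.toNat + 32).isValidChar := Or.inl (by omega)
    have := congrArg Char.toNat h
    rw [Char.toNat_ofNat] at this
    simp [hv] at this
    omega
  · simp only [PySem.Chars.lowerChar, hu, Bool.false_eq_true, if_false] at h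
    subst h
    exact hu (by decide)

lemma lower_ne_oov (s : String) : PySem.Str.lower s ≠ "#OOV#" := by
  intro h
  have h2 : (PySem.Str.lower s).toList = "#OOV#".toList := by rw [h]
  rw [PySem.Str.toList_lower] at h2
  have hm : 'O' ∈ PySem.Chars.lower s.toList := by
    rw [h2]; decide
  simp only [PySem.Chars.lower, List.mem_map] at hm
  obtain ⟨c, _, hc⟩ := hm
  exact lowerChar_ne_O c hc

lemma enumerate_append_one {α : Type} (xs : List α) (x : α) (s : Int) :
    PySem.List.enumerate (xs ++ [x]) s
      = PySem.List.enumerate xs s ++ [(s + xs.length, x)] := by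
  induction xs generalizing s with
  | nil => simp [PySem.List.enumerate_nil, PySem.List.enumerate_cons]
  | cons y ys ih =>
      simp [PySem.List.enumerate_cons, ih]
      omega

lemma numb_append (ks : List String) (w : String) :
    numb (ks ++ [w]) = numb ks ++ [(w, (ks.length : Int) + 1)] := by
  unfold numb
  rw [enumerate_append_one]
  simp [add_comm]

lemma map_fst_numb (ks : List String) : (numb ks).map (fun p => p.1) = ks := by
  unfold numb
  rw [List.map_map]
  exact PySem.List.map_snd_enumerate ks 1

-- A's nested loop, flattened and characterised: the dict holds ('#OOV#',0) then the deduped words numbered from 1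
lemma loopA (ws : List String) : ∀ (ks : List String), ks.Nodup → "#OOV#" ∉ ks →
    (∀ w ∈ ws, w ≠ "#OOV#") →
    ws.foldl stepA (PySem.Dict.mk (("#OOV#", 0) :: numb ks), (ks.length : Int) + 1)
      = (PySem.Dict.mk (("#OOV#", 0) :: numb (PySem.Set.update ks ws)),
         ((PySem.Set.update ks ws).length : Int) + 1) := by
  induction ws with
  | nil => intro ks _ _ _; simp [PySem.Set.update]
  | cons w ws ih =>
      intro ks hnd hoov hall
      have hw : w ≠ "#OOV#" := hall w (by simp)
      have hcont : (PySem.Dict.mk (("#OOV#", 0) :: numb ks)).contains w = decide (w ∈ ks) := by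
        rw [PySem.Dict.contains_eq_decide_mem_keys, PySem.Dict.keys_mk]
        simp only [List.map_cons, map_fst_numb, List.mem_cons]
        simp [hw]
      have hupd : PySem.Set.update ks (w :: ws) = PySem.Set.update (PySem.Set.add ks w) ws := rfl
      by_cases hmem : w ∈ ks
      · have hadd : PySem.Set.add ks w = ks := by
          simp [PySem.Set.add, PySem.Set.contains, hmem]
        have hstep : stepA (PySem.Dict.mk (("#OOV#", 0) :: numb ks), (ks.length : Int) + 1) w
            = (PySem.Dict.mk (("#OOV#", 0) :: numb ks), (ks.length : Int) + 1) := by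
          unfold stepA
          simp [hcont, hmem]
        rw [List.foldl_cons, hstep, hupd, hadd]
        exact ih ks hnd hoov (fun x hx => hall x (by simp [hx]))
      · have hadd : PySem.Set.add ks w = ks ++ [w] := by
          simp [PySem.Set.add, PySem.Set.contains, hmem]
        have hins : ((PySem.Dict.mk (("#OOV#", 0) :: numb ks)).insert w ((ks.length : Int) + 1))
            = PySem.Dict.mk (("#OOV#", 0) :: numb (ks ++ [w])) := by
          apply PySem.Dict.ext
          rw [PySem.Dict.items_insert_of_not_contains _ _ (by simp [hcont, hmem])]
          simp [numb_append]
        have hstep : stepA (PySem.Dict.mk (("#OOV#", 0) :: numb ks), (ks.length : Int) + 1) w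
            = (PySem.Dict.mk (("#OOV#", 0) :: numb (ks ++ [w])), ((ks ++ [w]).length : Int) + 1) := by
          unfold stepA
          simp only [hcont, hmem, decide_eq_false_iff_not, not_false_iff, if_true]
          rw [hins]
          simp only [Prod.mk.injEq, true_and, List.length_append, List.length_cons,
            List.length_nil]
          push_cast
          ring
        rw [List.foldl_cons, hstep, hupd, hadd]
        exact ih (ks ++ [w])
          (hnd.append (List.nodup_singleton w)
            (fun a ha hw' => hmem ((List.mem_singleton.mp hw') ▸ ha)))
          (by simp [hoov, Ne.symm hw])
          (fun x hx => hall x (by simp [hx]))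

lemma nested_eq_flat (sens : List (List String)) (init : PySem.Dict String Int × Int) :
    sens.foldl (fun st sen =>
        sen.foldl (fun (st : PySem.Dict String Int × Int) word =>
          if st.1.contains (PySem.Str.lower word) = false then
            (st.1.insert (PySem.Str.lower word) st.2, st.2 + 1)
          else st) st) init
      = (sens.flatMap (fun sen => sen.map PySem.Str.lower)).foldl stepA init := by
  induction sens generalizing init with
  | nil => simp
  | cons sen rest ih =>
      rw [List.foldl_cons, List.flatMap_cons, List.foldl_append, ih, List.foldl_map]
      rfl

-- B's reverse overwrite pass: the surviving value of a word is its FIRST-occurrence position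
lemma get?_revfold (l : List String) : ∀ (s : Int) (d : PySem.Dict String Int) (w : String),
    (((PySem.List.enumerate l s).reverse).foldl
        (fun (d : PySem.Dict String Int) p => d.insert p.2 p.1) d).get? w
      = if w ∈ l then some (s + (l.idxOf w : Int)) else d.get? w := by
  induction l with
  | nil => intro s d w; simp [PySem.List.enumerate_nil]
  | cons x t ih =>
      intro s d w
      rw [PySem.List.enumerate_cons, List.reverse_cons, List.foldl_append]
      simp only [List.foldl_cons, List.foldl_nil]
      rw [PySem.Dict.get?_insert]
      by_cases hwx : w = x
      · subst hwx
        simp [List.idxOf_cons_self]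
      · rw [if_neg hwx, ih (s + 1) d w]
        by_cases hwt : w ∈ t
        · rw [if_pos hwt, if_pos (by simp [hwt])]
          rw [List.idxOf_cons_ne _ (by exact fun h => hwx h.symm)]
          push_cast
          ring_nf
        · rw [if_neg hwt, if_neg (by simp [hwx, hwt])]

-- dedup peels its head and removes later copies
lemma update_eq_append (n : Nat) : ∀ (ws ks : List String), ws.length ≤ n →
    PySem.Set.update ks ws = ks ++ PySem.Set.update [] (ws.filter (fun w => !ks.contains w)) := by
  induction n with
  | zero =>
      intro ws ks h
      have : ws = [] := List.eq_nil_of_length_eq_zero (Nat.le_zero.mp h)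
      subst this
      simp [PySem.Set.update]
  | succ n ih =>
      intro ws ks h
      match ws with
      | [] => simp [PySem.Set.update]
      | w :: ws =>
          simp only [List.length_cons, Nat.add_le_add_iff_right] at h
          by_cases hmem : w ∈ ks
          · have hadd : PySem.Set.add ks w = ks := by
              simp [PySem.Set.add, PySem.Set.contains, hmem]
            have hf : (w :: ws).filter (fun w => !ks.contains w)
                = ws.filter (fun w => !ks.contains w) := by
              simp [hmem]
            rw [show PySem.Set.update ks (w :: ws) = PySem.Set.update (PySem.Set.add ks w) ws from rfl,
              hadd, hf]
            exact ih ws ks h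
          · have hadd : PySem.Set.add ks w = ks ++ [w] := by
              simp [PySem.Set.add, PySem.Set.contains, hmem]
            have hf : (w :: ws).filter (fun w => !ks.contains w)
                = w :: ws.filter (fun w => !ks.contains w) := by
              simp [hmem]
            rw [show PySem.Set.update ks (w :: ws) = PySem.Set.update (PySem.Set.add ks w) ws from rfl,
              hadd, hf]
            rw [ih ws (ks ++ [w]) h]
            have h2 : PySem.Set.update [] (w :: ws.filter (fun w => !ks.contains w))
                = PySem.Set.update [w] (ws.filter (fun w => !ks.contains w)) := by
              rw [show PySem.Set.update [] (w :: ws.filter (fun w => !ks.contains w))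
                  = PySem.Set.update (PySem.Set.add [] w) (ws.filter (fun w => !ks.contains w)) from rfl]
              congr 1
            rw [h2, ih (ws.filter (fun w => !ks.contains w)) [w]
                (le_trans (List.length_filter_le _ _) h)]
            rw [List.filter_filter]
            rw [List.append_assoc]
            congr 3
            apply List.filter_congr
            intro a _
            simp
            rw [Bool.and_comm]

lemma dedup_cons (x : String) (ws : List String) :
    PySem.List.dedup (x :: ws) = x :: PySem.List.dedup (ws.filter (fun w => !(w == x))) := by
  have h1 : PySem.List.dedup (x :: ws) = PySem.Set.update [x] ws := rfl
  rw [h1, update_eq_append ws.length ws [x] le_rfl]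
  have : ∀ l : List String, PySem.Set.update ([] : List String) l = PySem.List.dedup l := fun _ => rfl
  rw [this]
  simp only [List.singleton_append]
  congr 2
  apply List.filter_congr
  intro a _
  simp only [List.contains_cons, List.contains_nil, Bool.or_false]

-- idxOf order is preserved when passing from a filtered list back to the full list
lemma idxOf_filter_mono (t : List String) : ∀ (p : String → Bool) (a b : String),
    a ∈ t.filter p → b ∈ t.filter p →
    (t.filter p).idxOf a < (t.filter p).idxOf b → t.idxOf a < t.idxOf b := by
  induction t with
  | nil => intro p a b ha _ _; simp at ha
  | cons c t ih =>
      intro p a b ha hb hlt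
      by_cases hpc : p c = true
      · rw [List.filter_cons_of_pos hpc] at ha hb hlt
        by_cases hac : a = c
        · subst hac
          rw [List.idxOf_cons_self] at hlt ⊢
          have hbc : b ≠ a := by
            intro h; subst h; rw [List.idxOf_cons_self] at hlt; omega
          rw [List.idxOf_cons_ne _ (fun h => hbc h.symm)]
          omega
        · have hbc : b ≠ c := by
            intro h; subst h
            rw [List.idxOf_cons_self, List.idxOf_cons_ne _ (fun h => hac h.symm)] at hlt
            omega
          rw [List.idxOf_cons_ne _ (fun h => hac h.symm),
              List.idxOf_cons_ne _ (fun h => hbc h.symm)] at hlt ⊢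
          have ha' : a ∈ t.filter p := by
            rcases List.mem_cons.mp ha with h | h
            · exact absurd h hac
            · exact h
          have hb' : b ∈ t.filter p := by
            rcases List.mem_cons.mp hb with h | h
            · exact absurd h hbc
            · exact h
          have := ih p a b ha' hb' (by omega)
          omega
      · rw [List.filter_cons_of_neg hpc] at ha hb hlt
        have hac : a ≠ c := by
          intro h; subst h
          have := List.of_mem_filter ha; simp [hpc] at this
        have hbc : b ≠ c := by
          intro h; subst h
          have := List.of_mem_filter hb; simp [hpc] at this
        rw [List.idxOf_cons_ne _ (fun h => hac h.symm),
            List.idxOf_cons_ne _ (fun h => hbc h.symm)]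
        have := ih p a b ha hb hlt
        omega

-- dedup lists its elements in strictly increasing order of first occurrence
lemma dedup_pairwise_idxOf (n : Nat) : ∀ (ws : List String), ws.length ≤ n →
    (PySem.List.dedup ws).Pairwise (fun a b => ws.idxOf a < ws.idxOf b) := by
  induction n with
  | zero =>
      intro ws h
      have : ws = [] := List.eq_nil_of_length_eq_zero (Nat.le_zero.mp h)
      subst this
      simp [PySem.List.dedup, PySem.Set.ofList]
  | succ n ih =>
      intro ws h
      match ws with
      | [] => simp [PySem.List.dedup, PySem.Set.ofList]
      | x :: t =>
          simp only [List.length_cons, Nat.add_le_add_iff_right] at h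
          rw [dedup_cons]
          constructor
          · intro b hb
            have hbmem : b ∈ t.filter (fun w => !(w == x)) :=
              (PySem.List.mem_dedup _ _).mp hb
            have hbx : b ≠ x := by
              have := List.of_mem_filter hbmem; simpa using this
            rw [List.idxOf_cons_self, List.idxOf_cons_ne _ (fun h => hbx h.symm)]
            omega
          · have hp := ih (t.filter (fun w => !(w == x)))
              (le_trans (List.length_filter_le _ _) h)
            refine hp.imp_of_mem ?_
            intro a b ha hb hlt
            have ha' : a ∈ t.filter (fun w => !(w == x)) := (PySem.List.mem_dedup _ _).mp ha
            have hb' : b ∈ t.filter (fun w => !(w == x)) := (PySem.List.mem_dedup _ _).mp hb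
            have hax : a ≠ x := by have := List.of_mem_filter ha'; simpa using this
            have hbx : b ≠ x := by have := List.of_mem_filter hb'; simpa using this
            rw [List.idxOf_cons_ne _ (fun h => hax h.symm),
                List.idxOf_cons_ne _ (fun h => hbx h.symm)]
            have := idxOf_filter_mono t _ a b ha' hb' hlt
            omega

-- shift of numbering: enumerate from 0 with value+1 is enumerate from 1
lemma enum_shift (ks : List String) : ∀ (s : Int),
    (PySem.List.enumerate ks s).map (fun p => (p.2, p.1 + 1))
      = (PySem.List.enumerate ks (s + 1)).map (fun p => (p.2, p.1)) := by
  induction ks with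
  | nil => intro s; simp [PySem.List.enumerate_nil]
  | cons x t ih => intro s; simp [PySem.List.enumerate_cons, ih]

-- ===== VERDICT (by name: the statement is the Claim_ definition above) =====
theorem get_widx_spec : Claim_equal_get_widx := by
  intro sens _
  unfold Spec_get_widx get_widx get_widx_alt
  dsimp only
  rw [nested_eq_flat]
  set flat := sens.flatMap (fun sen => sen.map PySem.Str.lower) with hflat
  have hws_oov : ∀ w ∈ flat, w ≠ "#OOV#" := by
    intro w hw
    rw [hflat] at hw
    simp only [List.mem_flatMap, List.mem_map] at hw
    obtain ⟨sen, _, word, _, rfl⟩ := hw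
    exact lower_ne_oov word
  -- A's side: the loop produces ('#OOV#',0) followed by the numbered dedup
  have h0 : (PySem.Dict.empty.insert "#OOV#" (0 : Int), (1 : Int))
      = (PySem.Dict.mk (("#OOV#", 0) :: numb []), (([] : List String).length : Int) + 1) := by
    simp [numb, PySem.List.enumerate_nil]
    rfl
  rw [h0, loopA flat [] List.nodup_nil (by simp) hws_oov]
  have hupd : PySem.Set.update ([] : List String) flat = PySem.List.dedup flat := rfl
  rw [hupd]
  -- B's side, step 1: get? of the reverse fold is the first-occurrence index
  set first := ((PySem.List.enumerate flat 0).reverse).foldl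
      (fun (d : PySem.Dict String Int) p => d.insert p.2 p.1) PySem.Dict.empty with hfirst
  have hget : ∀ w, first.get? w
      = if w ∈ flat then some ((flat.idxOf w : Int)) else none := by
    intro w
    rw [hfirst, get?_revfold flat 0 PySem.Dict.empty w]
    simp [PySem.Dict.get?_empty]
  -- step 2: the keys of `first` are a permutation of dedup flat
  have hnodk : first.keys.Nodup := by
    rw [hfirst]
    exact PySem.Dict.nodup_keys_foldl_insert_key _ _ _ _ (by simp [PySem.Dict.keys_empty])
  have hmemk : ∀ w, w ∈ first.keys ↔ w ∈ flat := by
    intro w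
    rw [← not_iff_not, ← PySem.Dict.get?_eq_none_iff_not_mem_keys, hget w]
    by_cases h : w ∈ flat <;> simp [h]
  have hperm : (PySem.List.dedup flat).Perm first.keys := by
    rw [List.perm_ext_iff_of_nodup (PySem.List.nodup_dedup flat) hnodk]
    intro a
    rw [PySem.List.mem_dedup, hmemk]
  -- step 3: sorting the keys by first-occurrence position is exactly dedup flat
  have hsorted : PySem.List.sorted first.keys (fun w => first.getD w 0) false
      = PySem.List.dedup flat := by
    apply PySem.List.sorted_eq_of_perm_of_pairwise_lt _ _ _ hperm
    refine (dedup_pairwise_idxOf flat.length flat le_rfl).imp_of_mem ?_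
    intro a b ha hb hlt
    have ha' : a ∈ flat := (PySem.List.mem_dedup _ _).mp ha
    have hb' : b ∈ flat := (PySem.List.mem_dedup _ _).mp hb
    rw [PySem.Dict.getD_eq_get?_getD, PySem.Dict.getD_eq_get?_getD, hget a, hget b,
      if_pos ha', if_pos hb']
    simpa using hlt
  rw [hsorted]
  -- step 4: numbering the fresh distinct words appends them behind ('#OOV#',0)
  set ks := PySem.List.dedup flat with hks
  have hfresh := PySem.Dict.items_foldl_insert_fresh
      (PySem.List.enumerate ks 0) (fun p => p.2) (fun p => p.1 + 1)
      ((PySem.Dict.empty : PySem.Dict String Int).insert "#OOV#" 0)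
      (by
        intro a ha
        have ha2 : a.2 ∈ ks := by
          have := List.mem_map_of_mem (f := fun p : Int × String => p.2) ha
          rwa [PySem.List.map_snd_enumerate] at this
        have hne : a.2 ≠ "#OOV#" :=
          hws_oov a.2 ((PySem.List.mem_dedup _ _).mp (hks ▸ ha2))
        rw [PySem.Dict.contains_insert]
        simp [hne, PySem.Dict.contains_empty])
      (by rw [PySem.List.map_snd_enumerate]; exact hks ▸ PySem.List.nodup_dedup flat)
  rw [hfresh]
  have hitems : ((PySem.Dict.empty : PySem.Dict String Int).insert "#OOV#" (0 : Int)).items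
      = [("#OOV#", 0)] := rfl
  rw [hitems]
  show (PySem.Dict.mk (("#OOV#", 0) :: numb ks)).items
      = ("#OOV#", 0) :: (PySem.List.enumerate ks 0).map (fun p => (p.2, p.1 + 1))
  rw [enum_shift ks 0]
  norm_num [numb]
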